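-- pv_equiv track=rewrite | github.com/adolincauthon/CS441-AI | fourtic/fourtic.py | score_edges
-- ===== SOURCE A (Python) =====
-- def add_tuples(x, y):
-- 	return (x[0] + y[0], x[1]+y[1])
--
-- def score_move(move):
-- 	if move == MAX:
-- 		return (1, 0)
-- 	elif move == MIN:
-- 		return (0, 1)
-- 	return (0, 0)
--
-- def score_edges(board):
-- 	score = (0, 0)
-- 	#score top and bottom
-- 	for move in board[0]:
-- 		score = add_tuples(score, score_move(move))
-- 	for move in board[3]:
-- 		score = add_tuples(score, score_move(move))
--
-- 	#middle edges
-- 	score = add_tuples(score, score_move(board[1][0]))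
-- 	score = add_tuples(score, score_move(board[2][0]))
-- 	score = add_tuples(score, score_move(board[1][3]))
-- 	score = add_tuples(score, score_move(board[2][3]))
-- 	return score
--
-- MAX = 'X'
--
-- MIN = 'O'
-- ===== SOURCE B (Python) =====
-- MAX = 'X'
--
-- MIN = 'O'
--
-- def score_edges(board):
-- 	edges = []
-- 	for move in board[0]:
-- 		edges.append(move)
-- 	for move in board[3]:
-- 		edges.append(move)
-- 	edges.append(board[1][0])
-- 	edges.append(board[2][0])
-- 	edges.append(board[1][3])
-- 	edges.append(board[2][3])
-- 	return (edges.count(MAX), edges.count(MIN))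
-- ===== Notes on version B (the rewrite author's own statement) =====
-- stated objective: simpler
-- what changed: Gathers the twelve edge cells into one flat list and returns (edges.count('X'), edges.count('O')), dropping the add_tuples/score_move helpers and the threaded pair accumulator.
import Mathlib
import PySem

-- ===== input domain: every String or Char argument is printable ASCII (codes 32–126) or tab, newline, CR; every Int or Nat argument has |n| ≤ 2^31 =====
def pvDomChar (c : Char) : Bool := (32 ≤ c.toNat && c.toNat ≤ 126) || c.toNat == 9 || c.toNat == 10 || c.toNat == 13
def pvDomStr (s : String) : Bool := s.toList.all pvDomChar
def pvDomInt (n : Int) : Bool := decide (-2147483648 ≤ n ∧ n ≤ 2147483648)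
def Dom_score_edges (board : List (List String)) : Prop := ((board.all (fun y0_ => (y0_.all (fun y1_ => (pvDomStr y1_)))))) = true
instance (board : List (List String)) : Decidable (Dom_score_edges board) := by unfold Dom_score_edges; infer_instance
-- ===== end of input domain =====

-- ===== PORT A =====
-- B gathers the edge cells into one list and counts; proves return-value equality only.
def add_tuples (x y : Int × Int) : Int × Int := (x.1 + y.1, x.2 + y.2)

def score_move (move : String) : Int × Int :=
  if move = "X" then (1, 0)
  else if move = "O" then (0, 1)
  else (0, 0)

def score_edges (board : List (List String)) : Int × Int :=
  let score : Int × Int := (0, 0)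
  let score := (PySem.List.pyGetD board 0 []).foldl (fun s m => add_tuples s (score_move m)) score
  let score := (PySem.List.pyGetD board 3 []).foldl (fun s m => add_tuples s (score_move m)) score
  let score := add_tuples score (score_move (PySem.List.pyGetD (PySem.List.pyGetD board 1 []) 0 ""))
  let score := add_tuples score (score_move (PySem.List.pyGetD (PySem.List.pyGetD board 2 []) 0 ""))
  let score := add_tuples score (score_move (PySem.List.pyGetD (PySem.List.pyGetD board 1 []) 3 ""))
  let score := add_tuples score (score_move (PySem.List.pyGetD (PySem.List.pyGetD board 2 []) 3 ""))
  score

-- ===== PORT B =====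
def score_edges_alt (board : List (List String)) : Int × Int :=
  let edges : List String :=
    PySem.List.pyGetD board 0 [] ++ PySem.List.pyGetD board 3 [] ++
    [PySem.List.pyGetD (PySem.List.pyGetD board 1 []) 0 "",
     PySem.List.pyGetD (PySem.List.pyGetD board 2 []) 0 "",
     PySem.List.pyGetD (PySem.List.pyGetD board 1 []) 3 "",
     PySem.List.pyGetD (PySem.List.pyGetD board 2 []) 3 ""]
  ((PySem.List.count edges "X" : Int), (PySem.List.count edges "O" : Int))

-- ===== PRECONDITION & SPEC =====
-- Pre_ excludes exactly the inputs where A raises IndexError: fewer than 4 rows, or row 1 or 2 shorter than 4.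
def Pre_score_edges (board : List (List String)) : Prop :=
  4 ≤ board.length ∧ 4 ≤ (board.getD 1 []).length ∧ 4 ≤ (board.getD 2 []).length
instance (board : List (List String)) : Decidable (Pre_score_edges board) := by unfold Pre_score_edges; infer_instance

def pvWitness_score_edges : List (List String) :=
  [["X","O","X",""],["O","","","X"],["X","","","O"],["","O","X","X"]]

def Spec_score_edges (board : List (List String)) (out : Int × Int) : Prop := out = score_edges_alt board
instance (board : List (List String)) (out : Int × Int) : Decidable (Spec_score_edges board out) := by unfold Spec_score_edges; infer_instance

-- ===== CLAIM =====
def Claim_equal_score_edges : Prop := ∀ (board : List (List String)), Dom_score_edges board → Pre_score_edges board → Spec_score_edges board (score_edges board)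

-- ===== LEMMAS AND PROOFS =====
-- A's threaded (X,O) accumulator over a row equals the two counts of B.
theorem foldl_score_eq_counts (l : List String) (s : Int × Int) :
    l.foldl (fun s m => add_tuples s (score_move m)) s
      = (s.1 + (PySem.List.count l "X" : Int), s.2 + (PySem.List.count l "O" : Int)) := by
  induction l generalizing s with
  | nil => simp [PySem.List.count]
  | cons x xs ih =>
    rw [List.foldl_cons, ih]
    simp only [PySem.List.count_eq, List.count_cons]
    by_cases hx : x = "X" <;> by_cases ho : x = "O" <;>
      simp_all [add_tuples, score_move] <;> push_cast <;> ring

-- ===== VERDICT =====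
set_option maxHeartbeats 1000000 in
theorem score_edges_spec : Claim_equal_score_edges := by
  intro board _ hpre
  obtain ⟨h4, h1, h2⟩ := hpre
  match board, h4 with
  | r0 :: r1 :: r2 :: r3 :: rest, _ =>
    simp only [List.getD, List.getElem?_cons_zero, List.getElem?_cons_succ, Option.getD_some] at h1 h2
    unfold Spec_score_edges score_edges score_edges_alt
    simp only [PySem.List.pyGetD_ofNat', List.getD, List.getElem?_cons_zero,
      List.getElem?_cons_succ, Option.getD_some]
    rw [foldl_score_eq_counts, foldl_score_eq_counts]
    simp only [PySem.List.count_eq, List.count_append, List.count_cons, List.count_nil,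
      add_tuples, score_move]
    generalize PySem.List.pyGetD r1 0 "" = e1
    generalize PySem.List.pyGetD r2 0 "" = e2
    generalize PySem.List.pyGetD r1 3 "" = e3
    generalize PySem.List.pyGetD r2 3 "" = e4
    generalize r0.count "X" = c0x
    generalize r0.count "O" = c0o
    generalize r3.count "X" = c3x
    generalize r3.count "O" = c3o
    rw [Prod.ext_iff]
    constructor <;>
      simp only [beq_iff_eq, apply_ite Prod.fst, apply_ite Prod.snd] <;>
      split_ifs <;> simp_all <;> push_cast <;> omega
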